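-- pv_equiv track=rewrite | github.com/Dpcrack22/2024-25 | Programacion/Funciones/Anterior_exam_BAT.py | exercici4
-- ===== SOURCE A (Python) =====
-- def exercici4(lista1, lista2):
--     resultado = []
--     if len(lista1) == 0 and len(lista2) == 0:
--         return resultado
--
--     elif len(lista1) == 0 and len(lista2) != 0:
--         resultado = exercici4(lista1, lista2[1:])
--         return resultado
--
--     elif len(lista1) != 0 and len(lista2) == 0:
--         resultado = exercici4(lista1[1:], lista2)
--         return resultado
--
--     else:
--         if lista1[0] in lista2:
--             resultado = exercici4(lista1[1:], lista2)
--
--             if lista1[0] not in resultado: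
--                 resultado.append(lista1[0])
--                 return resultado
--
--             else:
--                 return resultado
--
--         else:
--             resultado = exercici4(lista1[1:], lista2)
--             return resultado
-- ===== SOURCE B (Python) =====
-- def exercici4(lista1, lista2):
--     resultado = []
--     for x in reversed(lista1):
--         if x in lista2 and x not in resultado:
--             resultado.append(x)
--     return resultado
-- ===== Notes on version B (the rewrite author's own statement) =====
-- stated objective: simpler
-- what changed: Replaces the four-branch double recursion (which also recurses pointlessly on lista2 when lista1 is empty) with a single iterative loop over reversed(lista1) accumulating unseen members of lista2.
import Mathlib
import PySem

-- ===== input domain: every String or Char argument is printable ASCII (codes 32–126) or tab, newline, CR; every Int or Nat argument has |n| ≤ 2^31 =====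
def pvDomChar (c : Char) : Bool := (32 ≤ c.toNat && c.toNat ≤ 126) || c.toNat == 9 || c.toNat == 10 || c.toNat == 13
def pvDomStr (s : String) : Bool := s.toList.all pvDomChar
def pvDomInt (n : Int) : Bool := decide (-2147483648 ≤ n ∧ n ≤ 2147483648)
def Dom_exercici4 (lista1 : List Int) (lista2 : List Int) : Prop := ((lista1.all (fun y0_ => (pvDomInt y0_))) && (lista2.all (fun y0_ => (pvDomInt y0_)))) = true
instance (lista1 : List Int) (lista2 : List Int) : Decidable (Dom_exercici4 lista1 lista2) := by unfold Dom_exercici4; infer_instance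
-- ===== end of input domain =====

-- B replaces A's four-branch double recursion with one iterative loop over reversed(lista1); objective: simpler.
-- ===== PORT A =====
def exercici4 (lista1 : List Int) (lista2 : List Int) : List Int :=
  match lista1, lista2 with
  | [], [] => []                                   -- len(l1)==0 and len(l2)==0
  | [], _ :: t2 => exercici4 [] t2                 -- len(l1)==0, recurse on lista2[1:]
  | _ :: t1, [] => exercici4 t1 []                 -- len(l2)==0, recurse on lista1[1:]
  | x :: t1, l2 =>
    if l2.contains x then                          -- lista1[0] in lista2
      let resultado := exercici4 t1 l2
      if !resultado.contains x then resultado ++ [x]   -- resultado.append(lista1[0])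
      else resultado
    else exercici4 t1 l2
termination_by (lista1.length, lista2.length)

-- ===== PORT B =====
def exercici4_alt (lista1 : List Int) (lista2 : List Int) : List Int :=
  lista1.reverse.foldl
    (fun resultado x =>
      if lista2.contains x && !resultado.contains x then resultado ++ [x] else resultado)
    []

-- ===== PRECONDITION & SPEC =====
def Spec_exercici4 (lista1 : List Int) (lista2 : List Int) (out : List Int) : Prop := out = exercici4_alt lista1 lista2
instance (lista1 : List Int) (lista2 : List Int) (out : List Int) : Decidable (Spec_exercici4 lista1 lista2 out) := by unfold Spec_exercici4; infer_instance

-- ===== CLAIM (what is proved, stated in full; the proofs are below) =====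
def Claim_equal_exercici4 : Prop := ∀ (lista1 : List Int) (lista2 : List Int), Dom_exercici4 lista1 lista2 → Spec_exercici4 lista1 lista2 (exercici4 lista1 lista2)

-- ===== LEMMAS AND PROOFS =====

-- ===== VERDICT (by name: the statement is the Claim_ definition above) =====
-- A on an empty lista1 only strips lista2 down to [] and returns [].
theorem exercici4_nil (l2 : List Int) : exercici4 [] l2 = [] := by
  induction l2 with
  | nil => simp [exercici4]
  | cons y t ih => simpa [exercici4] using ih

-- A satisfies one uniform cons-recurrence (the lista2 = [] branch agrees with it).
theorem exercici4_cons (x : Int) (t1 l2 : List Int) :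
    exercici4 (x :: t1) l2 =
      if l2.contains x && !(exercici4 t1 l2).contains x
      then exercici4 t1 l2 ++ [x] else exercici4 t1 l2 := by
  cases l2 with
  | nil => simp [exercici4]
  | cons y t2 =>
    simp only [exercici4]
    by_cases h : (y :: t2).contains x <;> simp [h] <;> split <;> simp_all

theorem exercici4_eq_alt (l1 l2 : List Int) : exercici4 l1 l2 = exercici4_alt l1 l2 := by
  induction l1 with
  | nil => simp [exercici4_nil, exercici4_alt]
  | cons x t ih =>
    rw [exercici4_cons, ih]
    simp [exercici4_alt, List.reverse_cons, List.foldl_append]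

theorem exercici4_spec : Claim_equal_exercici4 := by
  intro l1 l2 _
  unfold Spec_exercici4
  exact exercici4_eq_alt l1 l2
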